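-- pv_equiv track=rewrite | github.com/harshogale04/EY-TECHATHON-FMCG | qwerty-fmcg-rfp/utils/pdf_parser.py | parse_rfp_scope
-- ===== SOURCE A (Python) =====
-- def parse_rfp_scope(text):
--     # Simple heuristic: look for "Scope of Supply", "Quantity", "Description"
--     lines = text.split("\n")
--     scope_lines = []
--     in_scope = False
--     for line in lines:
--         line = line.strip().lower()
--         if "scope of supply" in line or "quantity" in line:
--             in_scope = True
--         if in_scope and line:
--             scope_lines.append(line)
--         if "technical specifications" in line or "test requirements" in line:
--             break
--     return "\n".join(scope_lines)
-- ===== SOURCE B (Python) =====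
-- def parse_rfp_scope(text):
--     norm = [l.strip().lower() for l in text.split("\n")]
--     start = next((i for i, l in enumerate(norm)
--                   if "scope of supply" in l or "quantity" in l), None)
--     end = next((i for i, l in enumerate(norm)
--                 if "technical specifications" in l or "test requirements" in l),
--                len(norm) - 1)
--     if start is None or start > end:
--         return ""
--     return "\n".join(l for l in norm[start:end + 1] if l)
-- ===== Notes on version B (the rewrite author's own statement) =====
-- stated objective: simpler
-- what changed: Replaces A's stateful scan (in_scope flag, append-and-break loop) by a normalize-once list comprehension, two index searches for the first start/end trigger lines, and a single slice-filter-join of lines[start:end+1].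
import Mathlib
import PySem

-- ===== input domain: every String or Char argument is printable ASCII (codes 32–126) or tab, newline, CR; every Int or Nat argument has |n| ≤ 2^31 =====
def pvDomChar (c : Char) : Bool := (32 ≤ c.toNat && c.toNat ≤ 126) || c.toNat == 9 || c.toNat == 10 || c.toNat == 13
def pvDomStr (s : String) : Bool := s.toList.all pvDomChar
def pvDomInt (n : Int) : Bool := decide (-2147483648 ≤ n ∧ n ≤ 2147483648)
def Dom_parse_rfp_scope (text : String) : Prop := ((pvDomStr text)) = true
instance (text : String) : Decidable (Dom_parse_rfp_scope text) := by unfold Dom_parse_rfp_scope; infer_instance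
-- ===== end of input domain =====

-- B replaces A's stateful scan-with-flag by a normalize-once / find-start-and-end-index /
-- slice-and-join decomposition (objective: simpler; same return value, no speed claim).

-- ===== PORT A =====
-- A's for-loop with the in_scope flag and the break, as structural recursion over the lines.
def parse_rfp_scope.loop : List String → Bool → List String
  | [], _ => []
  | l :: rest, inScope =>
    let line := PySem.Str.lower (PySem.Str.strip l)
    let inScope' := if PySem.Str.isIn "scope of supply" line || PySem.Str.isIn "quantity" line then
      true else inScope
    let acc := if inScope' && !(line == "") then [line] else []
    if PySem.Str.isIn "technical specifications" line || PySem.Str.isIn "test requirements" line then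
      acc
    else
      acc ++ parse_rfp_scope.loop rest inScope'

def parse_rfp_scope (text : String) : String :=
  PySem.Str.join "\n" (parse_rfp_scope.loop ((PySem.Str.split? text "\n").getD []) false)

-- ===== PORT B =====
def parse_rfp_scope_alt (text : String) : String :=
  let norm := ((PySem.Str.split? text "\n").getD []).map (fun l => PySem.Str.lower (PySem.Str.strip l))
  let start? := norm.findIdx? (fun l =>
    PySem.Str.isIn "scope of supply" l || PySem.Str.isIn "quantity" l)
  let endIdx := (norm.findIdx? (fun l =>
    PySem.Str.isIn "technical specifications" l || PySem.Str.isIn "test requirements" l)).getD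
      (norm.length - 1)
  match start? with
  | none => ""
  | some s =>
    if endIdx < s then ""
    else PySem.Str.join "\n" (((norm.take (endIdx + 1)).drop s).filter (fun l => !(l == "")))

-- ===== PRECONDITION & SPEC =====
def Spec_parse_rfp_scope (text : String) (out : String) : Prop := out = parse_rfp_scope_alt text
instance (text : String) (out : String) : Decidable (Spec_parse_rfp_scope text out) := by unfold Spec_parse_rfp_scope; infer_instance

-- ===== CLAIM (what is proved, stated in full; the proofs are below) =====
def Claim_equal_parse_rfp_scope : Prop := ∀ (text : String), Dom_parse_rfp_scope text → Spec_parse_rfp_scope text (parse_rfp_scope text)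

-- ===== LEMMAS AND PROOFS =====

-- normalized-line trigger predicates and the non-empty filter (proof-only helpers)
def pvTrigS (l : String) : Bool :=
  PySem.Str.isIn "scope of supply" l || PySem.Str.isIn "quantity" l
def pvTrigE (l : String) : Bool :=
  PySem.Str.isIn "technical specifications" l || PySem.Str.isIn "test requirements" l
def pvNe (l : String) : Bool := !(l == "")

-- A's loop, re-expressed over already-normalized lines
def pvNloop : List String → Bool → List String
  | [], _ => []
  | l :: rest, inScope =>
    let inScope' := if pvTrigS l then true else inScope
    let acc := if inScope' && pvNe l then [l] else []
    if pvTrigE l then acc else acc ++ pvNloop rest inScope'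

-- B's body, abstracted over the normalized line list
def pvBcore (ns : List String) : String :=
  match ns.findIdx? pvTrigS with
  | none => ""
  | some s =>
    let e := (ns.findIdx? pvTrigE).getD (ns.length - 1)
    if e < s then "" else PySem.Str.join "\n" (((ns.take (e + 1)).drop s).filter pvNe)

-- findIdx? returns an index within bounds (small helper)
theorem pvFindIdx?_lt_length {α : Type} (p : α → Bool) (xs : List α) (i : Nat)
    (h : xs.findIdx? p = some i) : i < xs.length := by
  induction xs generalizing i with
  | nil => simp at h
  | cons x rest ih =>
    rw [List.findIdx?_cons] at h
    by_cases hp : p x = true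
    · rw [if_pos hp] at h
      cases h
      simp
    · rw [if_neg hp] at h
      cases hj : rest.findIdx? p with
      | none => rw [hj] at h; simp at h
      | some j =>
        rw [hj] at h
        simp at h
        have := ih j hj
        simp [List.length_cons]
        omega

theorem pvLoop_eq_nloop (ls : List String) (b : Bool) :
    parse_rfp_scope.loop ls b
      = pvNloop (ls.map (fun l => PySem.Str.lower (PySem.Str.strip l))) b := by
  induction ls generalizing b with
  | nil => rfl
  | cons l rest ih =>
    simp only [parse_rfp_scope.loop, pvNloop, List.map_cons, pvTrigS, pvTrigE, pvNe, ih]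
    rfl

theorem pvNloop_true (ns : List String) :
    pvNloop ns true
      = (ns.take ((ns.findIdx? pvTrigE).getD (ns.length - 1) + 1)).filter pvNe := by
  induction ns with
  | nil => rfl
  | cons l rest ih =>
    cases hE : pvTrigE l with
    | true =>
      simp [pvNloop, hE, List.findIdx?_cons, List.filter_cons]
    | false =>
      simp only [pvNloop, hE, List.findIdx?_cons, ite_self, Bool.false_eq_true, if_false,
        Bool.true_and, ih]
      cases hR : rest.findIdx? pvTrigE with
      | some k =>
        simp only [Option.map_some, Option.getD_some, List.take_succ_cons, List.filter_cons]
        cases hl : pvNe l <;> simp [hl]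
      | none =>
        cases rest with
        | nil => cases hl : pvNe l <;> simp [hl]
        | cons r rs =>
          simp only [Option.map_none, Option.getD_none, List.length_cons]
          have h1 : rs.length + 1 - 1 + 1 = (r :: rs).length := by simp
          have h2 : rs.length + 1 + 1 - 1 + 1 = (l :: r :: rs).length := by simp
          rw [h1, h2, List.take_length, List.take_length, List.filter_cons]
          cases hl : pvNe l <;> simp [hl, List.filter_cons]

theorem pvNloop_true_of_trigS (l : String) (rest : List String) (h : pvTrigS l = true) :
    pvNloop (l :: rest) false = pvNloop (l :: rest) true := by
  simp [pvNloop, h]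

theorem pvNloop_false (ns : List String) :
    PySem.Str.join "\n" (pvNloop ns false) = pvBcore ns := by
  induction ns with
  | nil => rfl
  | cons l rest ih =>
    cases hS : pvTrigS l with
    | true =>
      rw [pvNloop_true_of_trigS l rest hS, pvNloop_true]
      simp [pvBcore, List.findIdx?_cons, hS]
    | false =>
      cases hE : pvTrigE l with
      | true =>
        have hA : pvNloop (l :: rest) false = [] := by
          simp [pvNloop, hS, hE]
        rw [hA]
        simp only [pvBcore, List.findIdx?_cons, hS, hE, Bool.false_eq_true, if_false, if_true]
        cases hR : rest.findIdx? pvTrigS with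
        | none => rfl
        | some s => rfl
      | false =>
        have hA : pvNloop (l :: rest) false = pvNloop rest false := by
          simp [pvNloop, hS, hE]
        rw [hA, ih]
        simp only [pvBcore, List.findIdx?_cons, hS, hE, Bool.false_eq_true, if_false]
        cases hR : rest.findIdx? pvTrigS with
        | none => rfl
        | some s =>
          have hsl : s < rest.length := pvFindIdx?_lt_length pvTrigS rest s hR
          simp only [Option.map_some]
          cases hRE : rest.findIdx? pvTrigE with
          | some k =>
            simp only [Option.map_some, Option.getD_some]
            by_cases hks : k < s
            · have h' : k + 1 < s + 1 := by omega
              simp [hks, h']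
            · have h' : ¬ (k + 1 < s + 1) := by omega
              simp [hks, h', List.take_succ_cons, List.drop_succ_cons]
          | none =>
            simp only [Option.map_none, Option.getD_none, List.length_cons]
            have hne : rest ≠ [] := by rintro rfl; simp at hsl
            have h1 : ¬ (rest.length - 1 < s) := by omega
            have h2 : ¬ (rest.length + 1 - 1 < s + 1) := by omega
            rw [if_neg h1, if_neg h2]
            have h3 : rest.length - 1 + 1 = rest.length := by omega
            have h4 : rest.length + 1 - 1 + 1 = (l :: rest).length := by simp
            rw [h3, h4, List.take_length, List.take_length, List.drop_succ_cons]

-- ===== VERDICT (by name: the statement is the Claim_ definition above) =====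
theorem parse_rfp_scope_spec : Claim_equal_parse_rfp_scope := by
  intro text _
  unfold Spec_parse_rfp_scope parse_rfp_scope parse_rfp_scope_alt
  rw [pvLoop_eq_nloop, pvNloop_false]
  rfl
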